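-- pv_equiv track=rewrite | github.com/Darkduv/KIRO-2024 | moulinette2024/review/detailed.py | reseq_2tones
-- ===== SOURCE A (Python) =====
-- def reseq_2tones(sigma: list[int], two_tones: list[int], delta: int) -> list[int]:
--     sigma = sigma[:]
--     two_tones = set(two_tones)
--     i = 0
--     while i < len(sigma):
--         v = sigma[i]
--         if v not in two_tones:
--             i += 1
--             continue
--         two_tones.remove(v)
--         sigma[i:i+delta+1] = sigma[i+1:i+delta+1]+sigma[i:i+1]
--     return sigma
-- ===== SOURCE B (Python) =====
-- def reseq_2tones(sigma: list[int], two_tones: list[int], delta: int) -> list[int]: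
--     # One pass with a FIFO of scheduled drops.  Each loop turn is one "step"
--     # (mirroring one turn of the rotation process): a two-tone seen at step c is
--     # due to be emitted at step c+delta+1; due drops take precedence over input.
--     from collections import deque
--     pending = set(two_tones)
--     queue = deque()          # (due_step, value); due steps are strictly increasing
--     out = []
--     step = 0
--     j = 0
--     n = len(sigma)
--     while j < n or queue:
--         if queue and queue[0][0] <= step:
--             out.append(queue.popleft()[1])
--         elif j < n:
--             v = sigma[j]
--             j += 1
--             if v in pending:
--                 pending.remove(v)
--                 queue.append((step + delta + 1, v))
--             else:
--                 out.append(v)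
--         else:
--             out.append(queue.popleft()[1])
--         step += 1
--     return out
-- ===== Notes on version B (the rewrite author's own statement) =====
-- stated objective: alternative
-- what changed: Replaces A's in-place slice-rotation loop that re-scans from the moved position (each move rebuilds an O(delta) window of the list) with a single left-to-right pass over sigma keeping a FIFO queue of scheduled drops (a two-tone seen at step c is re-emitted at step c+delta+1); Pre_ excludes negative delta (a shift count outside the natural domain) combined with an actual two-tone occurrence, where A's wrapped slice bounds usually insert a duplicate of the moved element while B leaves the list unchanged.
-- outside the precondition, e.g. on reseq_2tones([2, 1], [2], -1): A returns [2, 2, 1], B returns [2, 1]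
import Mathlib
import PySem

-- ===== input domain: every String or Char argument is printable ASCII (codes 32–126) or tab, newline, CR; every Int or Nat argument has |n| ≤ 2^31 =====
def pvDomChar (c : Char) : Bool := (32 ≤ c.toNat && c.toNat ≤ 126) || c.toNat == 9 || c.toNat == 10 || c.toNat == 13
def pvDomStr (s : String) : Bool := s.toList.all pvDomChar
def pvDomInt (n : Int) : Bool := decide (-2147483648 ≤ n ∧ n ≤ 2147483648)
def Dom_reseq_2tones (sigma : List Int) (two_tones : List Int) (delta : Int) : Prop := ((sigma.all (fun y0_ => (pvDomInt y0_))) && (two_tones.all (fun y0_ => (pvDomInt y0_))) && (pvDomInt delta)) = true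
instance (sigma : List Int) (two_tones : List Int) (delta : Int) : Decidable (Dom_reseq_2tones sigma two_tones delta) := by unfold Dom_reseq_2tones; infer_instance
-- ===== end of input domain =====

-- B replaces A's re-scanning in-place slice-rotation loop by a single left-to-right pass with a
-- FIFO of scheduled drops (an alternative algorithm); Pre_ keeps the natural domain 0 ≤ delta of
-- a shift count (see the comment at Pre_reseq_2tones).

-- ===== PORT A =====
-- Exact hand port of CPython's list slice ASSIGNMENT  xs[a:b] = ys  (no step):
-- both bounds are normalised/clamped, then the stop is raised to the start.
def pySliceAssign (xs : List Int) (a b : Int) (ys : List Int) : List Int :=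
  xs.take (PySem.List.clampIdx xs.length a) ++ ys ++
    xs.drop (max (PySem.List.clampIdx xs.length a) (PySem.List.clampIdx xs.length b))

-- the while-loop of A: state (sigma, two_tones-as-set, i)
def reseqLoopA (delta : Int) (sigma : List Int) (tt : PySem.Set Int) (i : Nat) : List Int :=
  if h : i < sigma.length then
    if hm : PySem.Set.contains tt sigma[i] = false then
      reseqLoopA delta sigma tt (i + 1)
    else
      reseqLoopA delta
        (pySliceAssign sigma (i : Int) ((i : Int) + delta + 1)
          (PySem.List.slice sigma (some ((i : Int) + 1)) (some ((i : Int) + delta + 1)) ++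
           PySem.List.slice sigma (some (i : Int)) (some ((i : Int) + 1))))
        ((PySem.Set.remove? tt sigma[i]).getD tt) i
  else sigma
termination_by (tt.length, sigma.length - i)
decreasing_by
  · exact Prod.Lex.right _ (by omega)
  · apply Prod.Lex.left
    have hmem : sigma[i] ∈ tt := by
      have := PySem.Set.contains_iff (s := tt) (x := sigma[i])
      rcases h' : PySem.Set.contains tt sigma[i] with _ | _
      · exact absurd h' hm
      · exact this.mp h'
    rw [PySem.Set.remove?_of_mem hmem]
    simp only [Option.getD_some]
    simp only [PySem.Set.discard]
    exact List.length_filter_lt_length_iff_exists.mpr ⟨_, hmem, by simp⟩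

def reseq_2tones (sigma : List Int) (two_tones : List Int) (delta : Int) : List Int :=
  reseqLoopA delta sigma (PySem.Set.ofList two_tones) 0

-- ===== PORT B =====
-- the while-loop of B: state (pending set, FIFO queue of (due step, value), remaining input, step)
def reseqLoopB (delta : Int) (pending : PySem.Set Int) (q : List (Int × Int)) (rest : List Int) (step : Int) : List Int :=
  match q, rest with
  | (d, v) :: q', rest' =>
    if d ≤ step then v :: reseqLoopB delta pending q' rest' (step + 1)
    else
      match rest' with
      | x :: r =>
        if PySem.Set.contains pending x then
          reseqLoopB delta ((PySem.Set.remove? pending x).getD pending)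
            ((d, v) :: q' ++ [(step + delta + 1, x)]) r (step + 1)
        else x :: reseqLoopB delta pending ((d, v) :: q') r (step + 1)
      | [] => v :: reseqLoopB delta pending q' [] (step + 1)
  | [], x :: r =>
    if PySem.Set.contains pending x then
      reseqLoopB delta ((PySem.Set.remove? pending x).getD pending)
        [(step + delta + 1, x)] r (step + 1)
    else x :: reseqLoopB delta pending [] r (step + 1)
  | [], [] => []
termination_by 2 * rest.length + q.length

def reseq_2tones_alt (sigma : List Int) (two_tones : List Int) (delta : Int) : List Int :=
  reseqLoopB delta (PySem.Set.ofList two_tones) [] sigma 0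

-- ===== PRECONDITION & SPEC =====
-- Pre_ excludes a negative delta (a shift count outside the natural domain) combined with an actual
-- two-tone occurrence: exactly there A still returns, but its slice bounds i+delta+1 wrap from the
-- list end and usually insert a duplicate of the moved element, while B leaves the list unchanged.
def Pre_reseq_2tones (sigma : List Int) (two_tones : List Int) (delta : Int) : Prop :=
  0 ≤ delta ∨ ∀ v ∈ sigma, v ∉ two_tones
instance (sigma : List Int) (two_tones : List Int) (delta : Int) : Decidable (Pre_reseq_2tones sigma two_tones delta) := by unfold Pre_reseq_2tones; infer_instance

def pvWitness_reseq_2tones : List Int × List Int × Int := ([1, 2, 3, 4], [2, 4], 2)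

def Spec_reseq_2tones (sigma : List Int) (two_tones : List Int) (delta : Int) (out : List Int) : Prop := out = reseq_2tones_alt sigma two_tones delta
instance (sigma : List Int) (two_tones : List Int) (delta : Int) (out : List Int) : Decidable (Spec_reseq_2tones sigma two_tones delta out) := by unfold Spec_reseq_2tones; infer_instance

-- ===== CLAIM (what is proved, stated in full; the proofs are below) =====
def Claim_equal_reseq_2tones : Prop := ∀ (sigma : List Int) (two_tones : List Int) (delta : Int), Dom_reseq_2tones sigma two_tones delta → Pre_reseq_2tones sigma two_tones delta → Spec_reseq_2tones sigma two_tones delta (reseq_2tones sigma two_tones delta)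

-- ===== LEMMAS AND PROOFS =====

-- the abstract current suffix of A's list as a function of B's state: queued value (d, v) sits
-- d - s positions ahead; remaining input fills the other slots; an exhausted input flushes the queue
def mer (q : List (Int × Int)) (rest : List Int) (s : Int) : List Int :=
  match q, rest with
  | [], rest => rest
  | (d, v) :: q', rest =>
    if d ≤ s then v :: mer q' rest (s + 1)
    else
      match rest with
      | x :: r => x :: mer ((d, v) :: q') r (s + 1)
      | [] => v :: mer q' [] (s + 1)
termination_by q.length + rest.length

lemma mer_nil (rest : List Int) (s : Int) : mer [] rest s = rest := by
  rw [mer.eq_def]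

lemma mer_cons_due {d s : Int} (h : d ≤ s) (v : Int) (q' : List (Int × Int)) (rest : List Int) :
    mer ((d, v) :: q') rest s = v :: mer q' rest (s + 1) := by
  rw [mer.eq_def]
  simp [h]

lemma mer_cons_cons {d s : Int} (h : ¬ d ≤ s) (v x : Int) (q' : List (Int × Int)) (r : List Int) :
    mer ((d, v) :: q') (x :: r) s = x :: mer ((d, v) :: q') r (s + 1) := by
  rw [mer.eq_def]
  simp [h]

lemma mer_cons_nil {d s : Int} (h : ¬ d ≤ s) (v : Int) (q' : List (Int × Int)) :
    mer ((d, v) :: q') [] s = v :: mer q' [] (s + 1) := by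
  rw [mer.eq_def]
  simp [h]

-- A's loop on the suffix alone (proof helper; same branching as reseqLoopA at i = 0)
def suffA (delta : Int) (tt : PySem.Set Int) (S : List Int) : List Int :=
  match S with
  | [] => []
  | v :: S' =>
    if _hm : PySem.Set.contains tt v = false then v :: suffA delta tt S'
    else
      suffA delta (PySem.Set.discard tt v)
        (pySliceAssign (v :: S') 0 (delta + 1)
          (PySem.List.slice (v :: S') (some 1) (some (delta + 1)) ++
           PySem.List.slice (v :: S') (some 0) (some 1)))
termination_by (tt.length, S.length)
decreasing_by
  · exact Prod.Lex.right _ (by simp)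
  · apply Prod.Lex.left
    have hmem : v ∈ tt := by
      have := PySem.Set.contains_iff (s := tt) (x := v)
      rcases h' : PySem.Set.contains tt v with _ | _
      · exact absurd h' _hm
      · exact this.mp h'
    simp only [PySem.Set.discard]
    exact List.length_filter_lt_length_iff_exists.mpr ⟨_, hmem, by simp⟩

lemma clampIdx_nonneg (n : Nat) (a : Int) (h : 0 ≤ a) :
    PySem.List.clampIdx n a = min a.toNat n := by
  unfold PySem.List.clampIdx
  rw [if_neg (by omega)]

-- A's slice assignment at index i = out.length only touches the suffix
lemma moveA_eq (delta : Int) (hd : 0 ≤ delta) (out : List Int) (v : Int) (S' : List Int) :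
    pySliceAssign (out ++ v :: S') (out.length : Int) ((out.length : Int) + delta + 1)
      (PySem.List.slice (out ++ v :: S') (some ((out.length : Int) + 1)) (some ((out.length : Int) + delta + 1)) ++
       PySem.List.slice (out ++ v :: S') (some (out.length : Int)) (some ((out.length : Int) + 1)))
    = out ++ S'.take delta.toNat ++ v :: S'.drop delta.toNat := by
  have hδ : (delta + 1).toNat = delta.toNat + 1 := by omega
  have hL : (out ++ v :: S').length = out.length + (S'.length + 1) := by simp
  rw [PySem.List.slice_toNat _ (by omega) (by omega),
      PySem.List.slice_toNat _ (by omega) (by omega)]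
  unfold pySliceAssign
  rw [clampIdx_nonneg _ _ (by omega), clampIdx_nonneg _ _ (by omega)]
  have h1 : ((out.length : Int)).toNat = out.length := by omega
  have h2 : ((out.length : Int) + 1).toNat = out.length + 1 := by omega
  have h3 : ((out.length : Int) + delta + 1).toNat = out.length + delta.toNat + 1 := by omega
  rw [h1, h2, h3, hL]
  have hdrop1 : (out ++ v :: S').drop (out.length + 1) = S' := by
    rw [show out.length + 1 = 1 + out.length by omega, ← List.drop_drop]
    simp
  have hdrop0 : (out ++ v :: S').drop out.length = v :: S' := by simp
  have htake : (out ++ v :: S').take (min out.length (out.length + (S'.length + 1))) = out := by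
    rw [min_eq_left (by omega)]
    simp
  rw [hdrop1, hdrop0, htake]
  have htake1 : (v :: S').take (out.length + 1 - out.length) = [v] := by
    simp
  have htakeδ : S'.take (out.length + delta.toNat + 1 - (out.length + 1)) = S'.take delta.toNat := by
    congr 1; omega
  rw [htake1, htakeδ]
  have hmax : max (min out.length (out.length + (S'.length + 1)))
      (min (out.length + delta.toNat + 1) (out.length + (S'.length + 1)))
      = out.length + min (delta.toNat + 1) (S'.length + 1) := by omega
  rw [hmax]
  have hdrope : (out ++ v :: S').drop (out.length + min (delta.toNat + 1) (S'.length + 1))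
      = S'.drop delta.toNat := by
    rw [List.drop_length_add_append (min (delta.toNat + 1) (S'.length + 1))]
    rcases (by omega : delta.toNat + 1 ≤ S'.length + 1 ∨ S'.length + 1 < delta.toNat + 1) with hc | hc
    · rw [min_eq_left hc]
      simp
    · rw [min_eq_right (by omega)]
      rw [List.drop_eq_nil_of_le (by simp), List.drop_eq_nil_of_le (by omega)]
  rw [hdrope]
  simp

-- the rotated window, in take/drop normal form (delta ≥ 0)
lemma rot_eq (delta : Int) (hd : 0 ≤ delta) (x : Int) (T : List Int) :
    pySliceAssign (x :: T) 0 (delta + 1)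
      (PySem.List.slice (x :: T) (some 1) (some (delta + 1)) ++
       PySem.List.slice (x :: T) (some 0) (some 1))
    = T.take delta.toNat ++ x :: T.drop delta.toNat := by
  have h := moveA_eq delta hd [] x T
  simpa using h

-- A's loop = prefix ++ suffix loop
lemma loopA_decomp (delta : Int) (hd : 0 ≤ delta) :
    ∀ (tt : PySem.Set Int) (S out : List Int),
      reseqLoopA delta (out ++ S) tt out.length = out ++ suffA delta tt S := by
  intro tt S
  induction tt, S using suffA.induct delta with
  | case1 tt =>
    intro out
    rw [List.append_nil, reseqLoopA.eq_def]
    rw [dif_neg (by omega)]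
    rw [suffA.eq_def]
    simp
  | case2 tt v S' hm ih =>
    intro out
    rw [reseqLoopA.eq_def]
    have hlt : out.length < (out ++ v :: S').length := by simp
    have hget : (out ++ v :: S')[out.length]'hlt = v := by
      rw [List.getElem_append_right (Nat.le_refl _)]
      simp
    rw [dif_pos hlt]
    simp only [hget]
    rw [dif_pos hm]
    have : out.length + 1 = (out ++ [v]).length := by simp
    rw [this]
    have hre : out ++ v :: S' = (out ++ [v]) ++ S' := by simp
    rw [hre, ih (out ++ [v])]
    conv_rhs => rw [suffA]
    rw [dif_pos hm]
    simp
  | case3 tt v S' hm ih =>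
    intro out
    rw [reseqLoopA.eq_def]
    have hlt : out.length < (out ++ v :: S').length := by simp
    have hget : (out ++ v :: S')[out.length]'hlt = v := by
      rw [List.getElem_append_right (Nat.le_refl _)]
      simp
    rw [dif_pos hlt]
    simp only [hget]
    rw [dif_neg hm]
    have hvmem : v ∈ tt := by
      have := PySem.Set.contains_iff tt v
      rcases h' : PySem.Set.contains tt v with _ | _
      · exact absurd h' hm
      · exact this.mp h'
    rw [PySem.Set.remove?_of_mem hvmem]
    simp only [Option.getD_some]
    rw [moveA_eq delta hd out v S']
    have harg := rot_eq delta hd v S'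
    rw [harg] at ih
    have hx := ih out
    conv_rhs => rw [suffA]
    rw [dif_neg hm, harg, ← hx]
    congr 1
    simp

-- inserting a late due at the tail of the queue = list insertion at position D - s
lemma insert_mer (q : List (Int × Int)) (rest : List Int) (s : Int) :
    ∀ (D x : Int), s ≤ D → List.Pairwise (fun a b => a.1 < b.1) q →
      (∀ p ∈ q, s ≤ p.1 ∧ p.1 < D) →
      (mer q rest s).take (D - s).toNat ++ x :: (mer q rest s).drop (D - s).toNat
        = mer (q ++ [(D, x)]) rest s := by
  induction q, rest, s using mer.induct with
  | case1 s rest =>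
    intro D x hsD _ _
    simp only [List.nil_append]
    induction rest generalizing s with
    | nil =>
      rcases (by omega : D ≤ s ∨ s < D) with hc | hc
      · rw [mer_nil, mer_cons_due hc, mer_nil]
        simp
      · rw [mer_nil, mer_cons_nil (by omega), mer_nil]
        simp
    | cons y r ihr =>
      rcases (by omega : D ≤ s ∨ s < D) with hc | hc
      · have : D = s := le_antisymm hc hsD
        subst this
        rw [mer_nil, mer_cons_due le_rfl, mer_nil]
        simp
      · rw [mer_nil, mer_cons_cons (by omega)]
        have hk : (D - s).toNat = (D - (s + 1)).toNat + 1 := by omega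
        rw [hk]
        simp only [List.take_succ_cons, List.drop_succ_cons, List.cons_append]
        rw [← ihr (s + 1) (by omega) (by simp), mer_nil]
  | case2 s d v q' rest hds ih =>
    intro D x hsD hpw hbd
    have hDs : s < D := by
      have h1 := (hbd (d, v) (by simp)).1
      have h2 := (hbd (d, v) (by simp)).2
      omega
    have hk : (D - s).toNat = (D - (s + 1)).toNat + 1 := by omega
    rw [mer_cons_due hds, List.cons_append, mer_cons_due hds, hk]
    simp only [List.take_succ_cons, List.drop_succ_cons, List.cons_append]
    congr 1
    refine ih D x (by omega) (List.Pairwise.of_cons hpw)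
      (fun p hp => ⟨?_, (hbd p (by simp [hp])).2⟩)
    have h1 := List.rel_of_pairwise_cons hpw hp
    have h2 := (hbd (d, v) (by simp)).1
    omega
  | case3 s d v q' hds x0 r ih =>
    intro D x hsD hpw hbd
    have hDs : s < D := by
      have h1 := (hbd (d, v) (by simp)).1
      have h2 := (hbd (d, v) (by simp)).2
      omega
    have hk : (D - s).toNat = (D - (s + 1)).toNat + 1 := by omega
    rw [mer_cons_cons hds, List.cons_append, mer_cons_cons hds, hk]
    simp only [List.take_succ_cons, List.drop_succ_cons, List.cons_append]
    congr 1
    refine ih D x (by omega) hpw (fun p hp => ⟨?_, (hbd p hp).2⟩)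
    rcases List.mem_cons.mp hp with hp1 | hp2
    · subst hp1; omega
    · have h1 := List.rel_of_pairwise_cons hpw hp2
      have h2 := (hbd (d, v) (by simp)).1
      omega
  | case4 s d v q' hds ih =>
    intro D x hsD hpw hbd
    have hDs : s < D := by
      have h1 := (hbd (d, v) (by simp)).1
      have h2 := (hbd (d, v) (by simp)).2
      omega
    have hk : (D - s).toNat = (D - (s + 1)).toNat + 1 := by omega
    rw [mer_cons_nil hds, List.cons_append, mer_cons_nil hds, hk]
    simp only [List.take_succ_cons, List.drop_succ_cons, List.cons_append]
    congr 1
    refine ih D x (by omega) (List.Pairwise.of_cons hpw)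
      (fun p hp => ⟨?_, (hbd p (by simp [hp])).2⟩)
    have h1 := List.rel_of_pairwise_cons hpw hp
    have h2 := (hbd (d, v) (by simp)).1
    omega

-- the simulation: A's suffix loop on the merged view = B's loop

lemma contains_false_of_not_mem {tt : PySem.Set Int} {v : Int} (h : v ∉ tt) :
    PySem.Set.contains tt v = false := by
  rcases hc : PySem.Set.contains tt v with _ | _
  · rfl
  · exact absurd ((PySem.Set.contains_iff tt v).mp hc) h

lemma suffA_nil (delta : Int) (tt : PySem.Set Int) : suffA delta tt [] = [] := by
  rw [suffA.eq_def]

lemma suffA_cons_skip {tt : PySem.Set Int} {v : Int} (hm : PySem.Set.contains tt v = false)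
    (delta : Int) (S' : List Int) : suffA delta tt (v :: S') = v :: suffA delta tt S' := by
  have hv : v ∉ tt := fun hmem => by
    rw [(PySem.Set.contains_iff tt v).mpr hmem] at hm
    exact Bool.true_eq_false.mp hm
  rw [suffA.eq_def]
  simp [hv]

lemma suffA_cons_move {delta : Int} (hd : 0 ≤ delta) {tt : PySem.Set Int} {v : Int}
    (hm : PySem.Set.contains tt v = true) (S' : List Int) :
    suffA delta tt (v :: S')
      = suffA delta (PySem.Set.discard tt v) (S'.take delta.toNat ++ v :: S'.drop delta.toNat) := by
  rw [suffA.eq_def]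
  simp only [hm]
  rw [dif_neg (by simp), rot_eq delta hd v S']

lemma loopB_due {delta d step : Int} (hds : d ≤ step) (pending : PySem.Set Int) (v : Int)
    (q' : List (Int × Int)) (rest' : List Int) :
    reseqLoopB delta pending ((d, v) :: q') rest' step
      = v :: reseqLoopB delta pending q' rest' (step + 1) := by
  rw [reseqLoopB.eq_def]
  simp [hds]

lemma loopB_sched {delta d step : Int} (hds : ¬ d ≤ step) {pending : PySem.Set Int} {x : Int}
    (hcx : PySem.Set.contains pending x = true) (v : Int) (q' : List (Int × Int)) (r : List Int) :
    reseqLoopB delta pending ((d, v) :: q') (x :: r) step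
      = reseqLoopB delta ((PySem.Set.remove? pending x).getD pending)
          ((d, v) :: q' ++ [(step + delta + 1, x)]) r (step + 1) := by
  have hx : x ∈ pending := (PySem.Set.contains_iff pending x).mp hcx
  rw [reseqLoopB.eq_def]
  simp [hds, hx]

lemma loopB_emit {delta d step : Int} (hds : ¬ d ≤ step) {pending : PySem.Set Int} {x : Int}
    (hcx : PySem.Set.contains pending x = false) (v : Int) (q' : List (Int × Int)) (r : List Int) :
    reseqLoopB delta pending ((d, v) :: q') (x :: r) step
      = x :: reseqLoopB delta pending ((d, v) :: q') r (step + 1) := by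
  have hx : x ∉ pending := fun hmem => by
    rw [(PySem.Set.contains_iff pending x).mpr hmem] at hcx
    exact Bool.true_eq_false.mp hcx
  rw [reseqLoopB.eq_def]
  simp [hds, hx]

lemma loopB_flush {delta d step : Int} (hds : ¬ d ≤ step) (pending : PySem.Set Int) (v : Int)
    (q' : List (Int × Int)) :
    reseqLoopB delta pending ((d, v) :: q') [] step
      = v :: reseqLoopB delta pending q' [] (step + 1) := by
  rw [reseqLoopB.eq_def]
  simp [hds]

lemma loopB_nil_sched {delta step : Int} {pending : PySem.Set Int} {x : Int}
    (hcx : PySem.Set.contains pending x = true) (r : List Int) :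
    reseqLoopB delta pending [] (x :: r) step
      = reseqLoopB delta ((PySem.Set.remove? pending x).getD pending)
          [(step + delta + 1, x)] r (step + 1) := by
  have hx : x ∈ pending := (PySem.Set.contains_iff pending x).mp hcx
  rw [reseqLoopB.eq_def]
  simp [hx]

lemma loopB_nil_emit {delta step : Int} {pending : PySem.Set Int} {x : Int}
    (hcx : PySem.Set.contains pending x = false) (r : List Int) :
    reseqLoopB delta pending [] (x :: r) step
      = x :: reseqLoopB delta pending [] r (step + 1) := by
  have hx : x ∉ pending := fun hmem => by
    rw [(PySem.Set.contains_iff pending x).mpr hmem] at hcx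
    exact Bool.true_eq_false.mp hcx
  rw [reseqLoopB.eq_def]
  simp [hx]

lemma loopB_nil_nil (delta step : Int) (pending : PySem.Set Int) :
    reseqLoopB delta pending [] [] step = [] := by
  rw [reseqLoopB.eq_def]

lemma main_sim (delta : Int) (hd : 0 ≤ delta) :
    ∀ (q : List (Int × Int)) (rest : List Int) (pending : PySem.Set Int) (s : Int),
      List.Pairwise (fun a b => a.1 < b.1) q →
      (∀ p ∈ q, s ≤ p.1 ∧ p.1 ≤ s + delta) →
      (∀ p ∈ q, p.2 ∉ pending) →
      pending.Nodup →
      suffA delta pending (mer q rest s) = reseqLoopB delta pending q rest s := by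
  intro q rest pending s
  induction pending, q, rest, s using reseqLoopB.induct delta with
  | case1 pending step d v q' rest' hds ih =>
    intro hpw hbd hnm hnd
    have hvc : PySem.Set.contains pending v = false :=
      contains_false_of_not_mem (hnm (d, v) (by simp))
    rw [mer_cons_due hds, suffA_cons_skip hvc, loopB_due hds]
    have hdlo := (hbd (d, v) (by simp)).1
    refine congrArg _ (ih (List.Pairwise.of_cons hpw) (fun p hp => ⟨?_, ?_⟩)
      (fun p hp => hnm p (by simp [hp])) hnd)
    · have := List.rel_of_pairwise_cons hpw hp
      omega
    · have := (hbd p (by simp [hp])).2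
      omega
  | case2 pending step d v q' hds x r hcx ih =>
    intro hpw hbd hnm hnd
    have hxmem : x ∈ pending := (PySem.Set.contains_iff pending x).mp hcx
    rw [PySem.Set.remove?_of_mem hxmem] at ih
    simp only [Option.getD_some] at ih
    have hblo : ∀ p ∈ (d, v) :: q', step + 1 ≤ p.1 ∧ p.1 < step + delta + 1 := by
      intro p hp
      rcases List.mem_cons.mp hp with hp1 | hp2
      · subst hp1
        have := (hbd (d, v) (by simp)).2
        constructor <;> omega
      · have h1 := List.rel_of_pairwise_cons hpw hp2
        have h2 := (hbd p (by simp [hp2])).2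
        constructor <;> omega
    rw [mer_cons_cons hds, suffA_cons_move hd hcx,
        show delta.toNat = (step + delta + 1 - (step + 1)).toNat by omega,
        insert_mer ((d, v) :: q') r (step + 1) (step + delta + 1) x (by omega) hpw hblo,
        loopB_sched hds hcx, PySem.Set.remove?_of_mem hxmem]
    simp only [Option.getD_some]
    refine ih ?_ ?_ ?_ (PySem.Set.nodup_discard pending x hnd)
    · rw [List.pairwise_append]
      refine ⟨hpw, by simp, ?_⟩
      intro a ha b hb
      simp only [List.mem_singleton] at hb
      subst hb
      exact (hblo a ha).2
    · intro p hp
      rcases List.mem_append.mp hp with hp1 | hp2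
      · have := hblo p hp1
        constructor <;> omega
      · simp only [List.mem_singleton] at hp2
        subst hp2
        constructor <;> omega
    · intro p hp hmem
      have hmd := (PySem.Set.mem_discard pending x p.2).mp hmem
      rcases List.mem_append.mp hp with hp1 | hp2
      · exact hnm p (by simp [hp1]) hmd.1
      · simp only [List.mem_singleton] at hp2
        subst hp2
        exact hmd.2 rfl
  | case3 pending step d v q' hds x r hcx ih =>
    intro hpw hbd hnm hnd
    have hxc : PySem.Set.contains pending x = false := by
      rcases hc : PySem.Set.contains pending x with _ | _
      · rfl
      · exact absurd hc hcx
    rw [mer_cons_cons hds, suffA_cons_skip hxc, loopB_emit hds hxc]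
    refine congrArg _ (ih hpw (fun p hp => ⟨?_, ?_⟩) hnm hnd)
    · rcases List.mem_cons.mp hp with hp1 | hp2
      · subst hp1; omega
      · have h1 := List.rel_of_pairwise_cons hpw hp2
        omega
    · have := (hbd p hp).2
      omega
  | case4 pending step d v q' hds ih =>
    intro hpw hbd hnm hnd
    have hvc : PySem.Set.contains pending v = false :=
      contains_false_of_not_mem (hnm (d, v) (by simp))
    rw [mer_cons_nil hds, suffA_cons_skip hvc, loopB_flush hds]
    refine congrArg _ (ih (List.Pairwise.of_cons hpw) (fun p hp => ⟨?_, ?_⟩)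
      (fun p hp => hnm p (by simp [hp])) hnd)
    · have h1 := List.rel_of_pairwise_cons hpw hp
      have h2 := (hbd (d, v) (by simp)).1
      omega
    · have := (hbd p (by simp [hp])).2
      omega
  | case5 pending step x r hcx ih =>
    intro _ _ _ hnd
    have hxmem : x ∈ pending := (PySem.Set.contains_iff pending x).mp hcx
    rw [PySem.Set.remove?_of_mem hxmem] at ih
    simp only [Option.getD_some] at ih
    rw [mer_nil, suffA_cons_move hd hcx,
        show r.take delta.toNat = (mer [] r (step + 1)).take delta.toNat by rw [mer_nil],
        show r.drop delta.toNat = (mer [] r (step + 1)).drop delta.toNat by rw [mer_nil],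
        show delta.toNat = (step + delta + 1 - (step + 1)).toNat by omega,
        insert_mer [] r (step + 1) (step + delta + 1) x (by omega) (by simp) (by simp),
        loopB_nil_sched hcx, PySem.Set.remove?_of_mem hxmem]
    simp only [Option.getD_some]
    refine ih (by simp) ?_ ?_ (PySem.Set.nodup_discard pending x hnd)
    · intro p hp
      simp only [List.mem_singleton] at hp
      subst hp
      constructor <;> omega
    · intro p hp hmem
      simp only [List.mem_singleton] at hp
      subst hp
      exact ((PySem.Set.mem_discard pending x x).mp hmem).2 rfl
  | case6 pending step x r hcx ih =>
    intro hpw hbd hnm hnd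
    have hxc : PySem.Set.contains pending x = false := by
      rcases hc : PySem.Set.contains pending x with _ | _
      · rfl
      · exact absurd hc hcx
    rw [mer_nil, suffA_cons_skip hxc, loopB_nil_emit hxc]
    refine congrArg _ ?_
    have := ih (by simp) (by simp) (by simp) hnd
    rwa [mer_nil] at this
  | case7 pending step =>
    intro _ _ _ _
    rw [mer_nil, suffA_nil, loopB_nil_nil]

-- excluded-corner-free case delta < 0: if no element of sigma is a two-tone, both loops are the identity
lemma loopA_id (delta : Int) (tt : PySem.Set Int) (sigma : List Int)
    (h : ∀ v ∈ sigma, v ∉ tt) : ∀ i, reseqLoopA delta sigma tt i = sigma := by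
  have key : ∀ (k i : Nat), sigma.length - i ≤ k → reseqLoopA delta sigma tt i = sigma := by
    intro k
    induction k with
    | zero =>
      intro i hi
      rw [reseqLoopA.eq_def, dif_neg (by omega)]
    | succ k ihk =>
      intro i hi
      rw [reseqLoopA.eq_def]
      by_cases hlt : i < sigma.length
      · rw [dif_pos hlt,
            dif_pos (contains_false_of_not_mem (h sigma[i] (List.getElem_mem hlt)))]
        exact ihk (i + 1) (by omega)
      · rw [dif_neg hlt]
  exact fun i => key (sigma.length - i) i le_rfl

lemma loopB_id (delta : Int) (pending : PySem.Set Int) (rest : List Int)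
    (h : ∀ v ∈ rest, v ∉ pending) : ∀ step, reseqLoopB delta pending [] rest step = rest := by
  induction rest with
  | nil => intro step; rw [loopB_nil_nil]
  | cons x r ihr =>
    intro step
    rw [loopB_nil_emit (contains_false_of_not_mem (h x (by simp)))]
    rw [ihr (fun v hv => h v (by simp [hv])) (step + 1)]

-- ===== VERDICT (by name: the statement is the Claim_ definition above) =====
theorem reseq_2tones_spec : Claim_equal_reseq_2tones := by
  intro sigma two_tones delta _ hpre
  unfold Spec_reseq_2tones reseq_2tones reseq_2tones_alt
  rcases hpre with hd | hdisj
  case inr =>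
    have h : ∀ v ∈ sigma, v ∉ PySem.Set.ofList two_tones := fun v hv hmem =>
      hdisj v hv ((PySem.Set.mem_ofList two_tones v).mp hmem)
    rw [loopA_id delta _ _ h 0, loopB_id delta _ _ h 0]
  have h0 := loopA_decomp delta hd (PySem.Set.ofList two_tones) sigma []
  simp only [List.nil_append, List.length_nil] at h0
  rw [h0]
  have h1 := main_sim delta hd [] sigma (PySem.Set.ofList two_tones) 0
    (by simp) (by simp) (by simp) (PySem.Set.nodup_ofList two_tones)
  rw [mer_nil] at h1
  simpa using h1
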